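-- pv_equiv track=rewrite | github.com/dahrb/Inventive_Step_ADM | ADM/build_vdb.py | extract_from_log
-- ===== SOURCE A (Python) =====
-- from typing import List, Dict
--
-- def extract_from_log(log_items: list) -> Dict[str, str]:
--     """Heuristically extract invention name, description and prior art from a loaded log list."""
--     out = {
--         'invention_name': '',
--         'description': '',
--         'relevant_prior_art': ''
--     }
--     if not log_items:
--         return out
--
--     for item in log_items:
--         q = (item.get('question') or '').lower()
--         ans = item.get('answer') or ''
--         if not out['invention_name'] and 'title of your invention' in q:
--             out['invention_name'] = ans
--         if not out['description'] and ('brief description of your invention' in q or 'brief description of the technical field' in q):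
--             # prefer the explicit brief description question
--             out['description'] = ans
--         if not out['relevant_prior_art'] and ('relevant prior art' in q or 'please briefly describe the relevant prior art' in q):
--             out['relevant_prior_art'] = ans
--
--     #trim lengths
--     for k in out:
--         if isinstance(out[k], str):
--             out[k] = out[k].strip()[:800]
--
--     return out
-- ===== SOURCE B (Python) =====
-- def extract_from_log(log_items: list):
--     """Heuristically extract invention name, description and prior art from a loaded log list."""
--     def find(*needles):
--         return next((item.get('answer') for item in (log_items or [])
--                      if any(n in (item.get('question') or '').lower() for n in needles)
--                      and (item.get('answer') or '')), '')
--     fields = (('invention_name', find('title of your invention')),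
--               ('description', find('brief description of your invention',
--                                    'brief description of the technical field')),
--               ('relevant_prior_art', find('relevant prior art',
--                                           'please briefly describe the relevant prior art')))
--     return {k: (v.strip()[:800] if isinstance(v, str) else v) for k, v in fields}
-- ===== Notes on version B (the rewrite author's own statement) =====
-- stated objective: simpler
-- what changed: A's single stateful pass mutating a three-key dict is replaced by three independent first-non-empty-match lookups (one next() per field) assembled into the result dict.
import Mathlib
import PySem

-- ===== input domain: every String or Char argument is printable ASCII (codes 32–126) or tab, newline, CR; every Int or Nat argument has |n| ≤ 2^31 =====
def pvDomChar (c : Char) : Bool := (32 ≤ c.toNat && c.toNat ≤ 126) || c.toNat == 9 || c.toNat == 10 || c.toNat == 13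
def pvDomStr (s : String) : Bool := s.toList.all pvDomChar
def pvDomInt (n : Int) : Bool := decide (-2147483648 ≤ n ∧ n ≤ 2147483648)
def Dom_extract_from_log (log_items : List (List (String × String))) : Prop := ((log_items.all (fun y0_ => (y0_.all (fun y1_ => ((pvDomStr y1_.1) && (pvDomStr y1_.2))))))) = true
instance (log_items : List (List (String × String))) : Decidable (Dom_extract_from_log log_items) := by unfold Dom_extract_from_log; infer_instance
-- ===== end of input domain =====

-- B replaces A's single stateful pass (one dict mutated across all three fields) by three
-- independent first-non-empty-match lookups, one per field (objective: simpler decomposition).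

-- shared tiny primitive: Python's  v.strip()[:800]
def pvTrim (v : String) : String := PySem.Str.slice (PySem.Str.strip v) none (some 800)

-- ===== PORT A =====
-- body of A's 'for item in log_items' loop
def pvStepA (out : PySem.Dict String String) (item : List (String × String)) : PySem.Dict String String :=
  let q := PySem.Str.lower (((PySem.Dict.mk item).get? "question").getD "")
  let ans := ((PySem.Dict.mk item).get? "answer").getD ""
  let out := if out.getD "invention_name" "" = "" ∧ PySem.Str.isIn "title of your invention" q
             then out.insert "invention_name" ans else out
  let out := if out.getD "description" "" = "" ∧ (PySem.Str.isIn "brief description of your invention" q ∨ PySem.Str.isIn "brief description of the technical field" q)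
             then out.insert "description" ans else out
  let out := if out.getD "relevant_prior_art" "" = "" ∧ (PySem.Str.isIn "relevant prior art" q ∨ PySem.Str.isIn "please briefly describe the relevant prior art" q)
             then out.insert "relevant_prior_art" ans else out
  out

def extract_from_log (log_items : List (List (String × String))) : List (String × String) :=
  let out := PySem.Dict.ofList [("invention_name", ""), ("description", ""), ("relevant_prior_art", "")]
  if log_items = [] then out.items
  else
    let out := log_items.foldl pvStepA out
    -- 'for k in out: out[k] = out[k].strip()[:800]' (all values are str here)
    out.items.map (fun kv => (kv.1, pvTrim kv.2))

-- ===== PORT B =====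
-- next((item.get('answer') for item in (log_items or []) if any(n in q for n in needles) and (item.get('answer') or '')), '')
def pvFind (log_items : List (List (String × String))) (needles : List String) : String :=
  match log_items with
  | [] => ""
  | item :: rest =>
      let q := PySem.Str.lower (((PySem.Dict.mk item).get? "question").getD "")
      let ans := ((PySem.Dict.mk item).get? "answer").getD ""
      if needles.any (fun n => PySem.Str.isIn n q) ∧ ans ≠ "" then ans else pvFind rest needles

def extract_from_log_alt (log_items : List (List (String × String))) : List (String × String) :=
  [("invention_name", pvTrim (pvFind log_items ["title of your invention"])),
   ("description", pvTrim (pvFind log_items ["brief description of your invention", "brief description of the technical field"])),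
   ("relevant_prior_art", pvTrim (pvFind log_items ["relevant prior art", "please briefly describe the relevant prior art"]))]

-- ===== PRECONDITION & SPEC =====
def Spec_extract_from_log (log_items : List (List (String × String))) (out : List (String × String)) : Prop := out = extract_from_log_alt log_items
instance (log_items : List (List (String × String))) (out : List (String × String)) : Decidable (Spec_extract_from_log log_items out) := by unfold Spec_extract_from_log; infer_instance

-- ===== CLAIM (what is proved, stated in full; the proofs are below) =====
def Claim_equal_extract_from_log : Prop := ∀ (log_items : List (List (String × String))), Dom_extract_from_log log_items → Spec_extract_from_log log_items (extract_from_log log_items)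

-- ===== LEMMAS AND PROOFS =====

-- one step of A's loop on the 3-key dict, written with the dict flattened to its three values
lemma pvStepA_mk (item : List (String × String)) (a b c q ans : String)
    (hq : q = PySem.Str.lower (((PySem.Dict.mk item).get? "question").getD ""))
    (ha : ans = ((PySem.Dict.mk item).get? "answer").getD "") :
    pvStepA (PySem.Dict.mk [("invention_name", a), ("description", b), ("relevant_prior_art", c)]) item
      = PySem.Dict.mk
          [("invention_name", if a = "" ∧ PySem.Str.isIn "title of your invention" q then ans else a),
           ("description", if b = "" ∧ (PySem.Str.isIn "brief description of your invention" q ∨ PySem.Str.isIn "brief description of the technical field" q) then ans else b),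
           ("relevant_prior_art", if c = "" ∧ (PySem.Str.isIn "relevant prior art" q ∨ PySem.Str.isIn "please briefly describe the relevant prior art" q) then ans else c)] := by
  subst hq ha
  simp only [pvStepA]
  split_ifs <;> simp_all [PySem.Dict.getD, PySem.Dict.get?_mk_cons, PySem.Dict.insert, PySem.Dict.contains]

-- one field through one step: 'set only while empty, and an empty answer does not lock' =
-- 'first non-empty answer wins'
lemma pvField (a ans r : String) (P : Prop) [Decidable P] (Q : Prop) [Decidable Q] (h : P ↔ Q) :
    (if (if a = "" ∧ P then ans else a) = "" then r else (if a = "" ∧ P then ans else a))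
      = if a = "" then (if Q ∧ ans ≠ "" then ans else r) else a := by
  split_ifs <;> simp_all

-- A's whole loop, from arbitrary current field values a b c: a non-empty field stays put,
-- an empty one ends as pvFind of the remaining items
lemma pvLoopA (items : List (List (String × String))) (a b c : String) :
    items.foldl pvStepA (PySem.Dict.mk [("invention_name", a), ("description", b), ("relevant_prior_art", c)])
      = PySem.Dict.mk
          [("invention_name", if a = "" then pvFind items ["title of your invention"] else a),
           ("description", if b = "" then pvFind items ["brief description of your invention", "brief description of the technical field"] else b),
           ("relevant_prior_art", if c = "" then pvFind items ["relevant prior art", "please briefly describe the relevant prior art"] else c)] := by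
  induction items generalizing a b c with
  | nil => simp only [List.foldl_nil, pvFind]; split_ifs <;> simp_all
  | cons item rest ih =>
      rw [List.foldl_cons, pvStepA_mk item a b c _ _ rfl rfl, ih]
      simp only [PySem.Dict.mk.injEq, List.cons.injEq, Prod.mk.injEq, and_true, true_and]
      refine ⟨?_, ?_, ?_⟩ <;>
        · conv_rhs => rw [pvFind]
          exact pvField _ _ _ _ _ (by simp)

-- ===== VERDICT (by name: the statement is the Claim_ definition above) =====
theorem extract_from_log_spec : Claim_equal_extract_from_log := by
  intro log_items _
  unfold Spec_extract_from_log
  by_cases h : log_items = []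
  · subst h; decide
  · simp only [extract_from_log, if_neg h]
    rw [show PySem.Dict.ofList [("invention_name", ""), ("description", ""), ("relevant_prior_art", "")]
          = PySem.Dict.mk [("invention_name", ""), ("description", ""), ("relevant_prior_art", "")] from rfl,
        pvLoopA]
    simp [extract_from_log_alt]
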